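-- pv_equiv track=rewrite | github.com/xynehq/xyne | scripts/doclingTemp.py | cells_to_table_grid
-- ===== SOURCE A (Python) =====
-- from typing import Any, Dict, List, Tuple
--
-- def cells_to_table_grid(cells: List[Dict[str, Any]]) -> List[List[str]]:
--     """
--     Convert Docling page_cells (list of cells with row/col indices) into a 2D grid.
--     Expects each cell to carry at least: row, col, text (and optionally rowSpan/colSpan).
--     We will expand spans by repeating cell text in covered positions for Markdown/CSV export.
--     """
--     if not cells:
--         return []
--
--     max_row = 0
--     max_col = 0
--     for c in cells:
--         r = int(c.get("row", 0))
--         cidx = int(c.get("col", 0))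
--         rs = int(c.get("rowSpan", 1))
--         cs = int(c.get("colSpan", 1))
--         max_row = max(max_row, r + rs - 1)
--         max_col = max(max_col, cidx + cs - 1)
--
--     grid = [["" for _ in range(max_col + 1)] for _ in range(max_row + 1)]
--
--     for c in cells:
--         text = str(c.get("text", "") or "").strip()
--         r = int(c.get("row", 0))
--         cidx = int(c.get("col", 0))
--         rs = int(c.get("rowSpan", 1))
--         cs = int(c.get("colSpan", 1))
--         for dr in range(rs):
--             for dc in range(cs):
--                 rr = r + dr
--                 cc = cidx + dc
--                 if 0 <= rr < len(grid) and 0 <= cc < len(grid[0]):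
--                     # simple fill: replicate text across span (good enough for markdown/csv)
--                     grid[rr][cc] = text
--     return grid
-- ===== SOURCE B (Python) =====
-- from typing import Any, Dict, List, Tuple
--
-- def cells_to_table_grid(cells: List[Dict[str, Any]]) -> List[List[str]]:
--     """Single pass: build a sparse (row, col) -> text map plus running maxima,
--     then materialize the dense grid from the map."""
--     if not cells:
--         return []
--     coverage = {}
--     max_row = 0
--     max_col = 0
--     for c in cells:
--         text = str(c.get("text", "") or "").strip()
--         r = int(c.get("row", 0))
--         cidx = int(c.get("col", 0))
--         rs = int(c.get("rowSpan", 1))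
--         cs = int(c.get("colSpan", 1))
--         max_row = max(max_row, r + rs - 1)
--         max_col = max(max_col, cidx + cs - 1)
--         for dr in range(rs):
--             for dc in range(cs):
--                 coverage[(r + dr, cidx + dc)] = text
--     return [[coverage.get((rr, cc), "") for cc in range(max_col + 1)]
--             for rr in range(max_row + 1)]
-- ===== Notes on version B (the rewrite author's own statement) =====
-- stated objective: alternative
-- what changed: B replaces A's two cell-scans and pre-allocated dense grid mutated in place by one combined scan that records span coverage in a sparse (row,col)->text dict together with the running maxima, and then materializes the grid from the dict.
import Mathlib
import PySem

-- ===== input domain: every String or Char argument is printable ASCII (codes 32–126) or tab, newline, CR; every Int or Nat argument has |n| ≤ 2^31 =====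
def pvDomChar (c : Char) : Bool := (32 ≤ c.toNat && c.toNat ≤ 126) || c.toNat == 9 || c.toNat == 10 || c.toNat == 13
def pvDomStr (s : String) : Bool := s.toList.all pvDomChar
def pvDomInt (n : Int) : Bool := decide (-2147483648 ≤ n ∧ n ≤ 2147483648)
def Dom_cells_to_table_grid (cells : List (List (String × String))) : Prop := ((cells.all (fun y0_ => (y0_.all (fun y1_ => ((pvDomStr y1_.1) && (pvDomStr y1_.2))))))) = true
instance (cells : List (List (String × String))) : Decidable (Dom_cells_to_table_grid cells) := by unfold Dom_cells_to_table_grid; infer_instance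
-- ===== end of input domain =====

-- B maintains a sparse (row,col)->text dict in one cell-scan instead of A's two scans over a dense mutated grid; same result (objective: alternative).

-- shared field accessors: `int(c.get(key, dflt))` (total form of the parse; Pre_ excludes parse failures)
-- and `str(c.get("text","") or "").strip()` (exact: values are strings, so `str(.. or "")` is the identity)
def pvCellInt (c : List (String × String)) (key : String) (dflt : Int) : Int :=
  match c.find? (fun kv => kv.1 == key) with
  | some kv => (PySem.Int.ofStr? kv.2).getD 0
  | none => dflt

def pvCellText (c : List (String × String)) : String :=
  PySem.Str.strip (match c.find? (fun kv => kv.1 == "text") with | some kv => kv.2 | none => "")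

-- ===== PORT A =====
def cells_to_table_grid (cells : List (List (String × String))) : List (List String) :=
  if cells = [] then []
  else
    let mm := cells.foldl (fun (p : Int × Int) c =>
        (max p.1 (pvCellInt c "row" 0 + pvCellInt c "rowSpan" 1 - 1),
         max p.2 (pvCellInt c "col" 0 + pvCellInt c "colSpan" 1 - 1))) (0, 0)
    let grid0 : List (List String) := (PySem.List.pyRange 0 (mm.1 + 1) 1).map (fun _ =>
        (PySem.List.pyRange 0 (mm.2 + 1) 1).map (fun _ => ""))
    cells.foldl (fun grid c =>
        let text := pvCellText c
        let r := pvCellInt c "row" 0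
        let cidx := pvCellInt c "col" 0
        let rs := pvCellInt c "rowSpan" 1
        let cs := pvCellInt c "colSpan" 1
        (PySem.List.pyRange 0 rs 1).foldl (fun grid dr =>
          (PySem.List.pyRange 0 cs 1).foldl (fun grid dc =>
            let rr := r + dr
            let cc := cidx + dc
            -- `len(grid[0])`: grid is nonempty here, so grid[0] is pyGetD grid 0 [] exactly
            if 0 ≤ rr ∧ rr < (grid.length : Int) ∧ 0 ≤ cc ∧ cc < ((PySem.List.pyGetD grid 0 []).length : Int) then
              PySem.List.pySetD grid rr (PySem.List.pySetD (PySem.List.pyGetD grid rr []) cc text)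
            else grid) grid) grid) grid0

-- ===== PORT B =====
-- B-side helper: materialize the dense grid from the sparse coverage dict (Source B's final comprehension)
def pvMatz (cov : PySem.Dict (Int × Int) String) (mr mc : Int) : List (List String) :=
  (PySem.List.pyRange 0 (mr + 1) 1).map (fun rr =>
    (PySem.List.pyRange 0 (mc + 1) 1).map (fun cc => cov.getD (rr, cc) ""))

def cells_to_table_grid_alt (cells : List (List (String × String))) : List (List String) :=
  if cells = [] then []
  else
    let st := cells.foldl (fun (st : PySem.Dict (Int × Int) String × Int × Int) c =>
        let text := pvCellText c
        let r := pvCellInt c "row" 0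
        let cidx := pvCellInt c "col" 0
        let rs := pvCellInt c "rowSpan" 1
        let cs := pvCellInt c "colSpan" 1
        let cov := (PySem.List.pyRange 0 rs 1).foldl (fun cov dr =>
            (PySem.List.pyRange 0 cs 1).foldl (fun cov dc =>
              cov.insert (r + dr, cidx + dc) text) cov) st.1
        (cov, max st.2.1 (r + rs - 1), max st.2.2 (cidx + cs - 1)))
      (PySem.Dict.empty, 0, 0)
    pvMatz st.1 st.2.1 st.2.2

-- ===== PRECONDITION & SPEC =====
-- Pre_ excludes exactly the inputs where a row/col/rowSpan/colSpan value is not int()-parsable, where Python raises ValueError.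
def pvFieldOk (c : List (String × String)) (key : String) : Bool :=
  match c.find? (fun kv => kv.1 == key) with
  | some kv => (PySem.Int.ofStr? kv.2).isSome
  | none => true

def Pre_cells_to_table_grid (cells : List (List (String × String))) : Prop :=
  (cells.all (fun c => pvFieldOk c "row" && pvFieldOk c "col" && pvFieldOk c "rowSpan" && pvFieldOk c "colSpan")) = true

instance (cells : List (List (String × String))) : Decidable (Pre_cells_to_table_grid cells) := by
  unfold Pre_cells_to_table_grid; infer_instance

def pvWitness_cells_to_table_grid : (List (List (String × String))) :=
  [[("row", "0"), ("col", "1"), ("colSpan", "2"), ("text", " hi ")], [("row", "1"), ("text", "b")]]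

def Spec_cells_to_table_grid (cells : List (List (String × String))) (out : List (List String)) : Prop := out = cells_to_table_grid_alt cells
instance (cells : List (List (String × String))) (out : List (List String)) : Decidable (Spec_cells_to_table_grid cells out) := by unfold Spec_cells_to_table_grid; infer_instance

-- ===== CLAIM (what is proved, stated in full; the proofs are below) =====
def Claim_equal_cells_to_table_grid : Prop := ∀ (cells : List (List (String × String))), Dom_cells_to_table_grid cells → Pre_cells_to_table_grid cells → Spec_cells_to_table_grid cells (cells_to_table_grid cells)

-- ===== LEMMAS AND PROOFS =====

-- proof-side names for the step lambdas of the two ports (each equal by rfl)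
def pvMaxStep (p : Int × Int) (c : List (String × String)) : Int × Int :=
  (max p.1 (pvCellInt c "row" 0 + pvCellInt c "rowSpan" 1 - 1),
   max p.2 (pvCellInt c "col" 0 + pvCellInt c "colSpan" 1 - 1))

def pvAStep (grid : List (List String)) (c : List (String × String)) : List (List String) :=
  let text := pvCellText c
  let r := pvCellInt c "row" 0
  let cidx := pvCellInt c "col" 0
  let rs := pvCellInt c "rowSpan" 1
  let cs := pvCellInt c "colSpan" 1
  (PySem.List.pyRange 0 rs 1).foldl (fun grid dr =>
    (PySem.List.pyRange 0 cs 1).foldl (fun grid dc =>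
      let rr := r + dr
      let cc := cidx + dc
      if 0 ≤ rr ∧ rr < (grid.length : Int) ∧ 0 ≤ cc ∧ cc < ((PySem.List.pyGetD grid 0 []).length : Int) then
        PySem.List.pySetD grid rr (PySem.List.pySetD (PySem.List.pyGetD grid rr []) cc text)
      else grid) grid) grid

def pvCovStep (cov : PySem.Dict (Int × Int) String) (c : List (String × String)) : PySem.Dict (Int × Int) String :=
  (PySem.List.pyRange 0 (pvCellInt c "rowSpan" 1) 1).foldl (fun cov dr =>
    (PySem.List.pyRange 0 (pvCellInt c "colSpan" 1) 1).foldl (fun cov dc =>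
      cov.insert (pvCellInt c "row" 0 + dr, pvCellInt c "col" 0 + dc) (pvCellText c)) cov) cov

def pvBStep (st : PySem.Dict (Int × Int) String × Int × Int) (c : List (String × String)) :
    PySem.Dict (Int × Int) String × Int × Int :=
  (pvCovStep st.1 c, pvMaxStep st.2 c)

lemma A_eq (cells : List (List (String × String))) :
    cells_to_table_grid cells =
      if cells = [] then []
      else
        (PySem.List.pyRange 0 ((cells.foldl pvMaxStep (0, 0)).1 + 1) 1).map (fun _ =>
            (PySem.List.pyRange 0 ((cells.foldl pvMaxStep (0, 0)).2 + 1) 1).map (fun _ => ""))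
          |> cells.foldl pvAStep := rfl

lemma B_eq (cells : List (List (String × String))) :
    cells_to_table_grid_alt cells =
      if cells = [] then []
      else pvMatz (cells.foldl pvBStep (PySem.Dict.empty, 0, 0)).1
             (cells.foldl pvBStep (PySem.Dict.empty, 0, 0)).2.1
             (cells.foldl pvBStep (PySem.Dict.empty, 0, 0)).2.2 := rfl

lemma B_proj (cells : List (List (String × String)))
    (st : PySem.Dict (Int × Int) String × Int × Int) :
    cells.foldl pvBStep st = (cells.foldl pvCovStep st.1, cells.foldl pvMaxStep st.2) := by
  induction cells generalizing st with
  | nil => rfl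
  | cons c L ih => simpa [pvBStep] using ih (pvBStep st c)

lemma maxfold_le_init (L : List (List (String × String))) (p : Int × Int) :
    p.1 ≤ (L.foldl pvMaxStep p).1 ∧ p.2 ≤ (L.foldl pvMaxStep p).2 := by
  induction L generalizing p with
  | nil => exact ⟨le_refl _, le_refl _⟩
  | cons c L ih =>
      have h := ih (pvMaxStep p c)
      simp only [List.foldl_cons]
      exact ⟨le_trans (le_max_left _ _) h.1, le_trans (le_max_left _ _) h.2⟩

lemma maxfold_mem (L : List (List (String × String))) (c : List (String × String)) (hc : c ∈ L)
    (p : Int × Int) :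
    pvCellInt c "row" 0 + pvCellInt c "rowSpan" 1 - 1 ≤ (L.foldl pvMaxStep p).1 ∧
    pvCellInt c "col" 0 + pvCellInt c "colSpan" 1 - 1 ≤ (L.foldl pvMaxStep p).2 := by
  induction L generalizing p with
  | nil => cases hc
  | cons d L ih =>
      simp only [List.foldl_cons]
      rcases List.mem_cons.mp hc with h | h
      · subst h
        have h := maxfold_le_init L (pvMaxStep p c)
        exact ⟨le_trans (le_max_right _ _) h.1, le_trans (le_max_right _ _) h.2⟩
      · exact ih h _

lemma matz_length (cov : PySem.Dict (Int × Int) String) (mr mc : Int) :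
    (pvMatz cov mr mc).length = (mr + 1).toNat := by
  simp [pvMatz, PySem.List.length_pyRange_one]

lemma matz_getElem (cov : PySem.Dict (Int × Int) String) (mr mc : Int) (k : Nat)
    (hk : k < (pvMatz cov mr mc).length) :
    (pvMatz cov mr mc)[k] = (PySem.List.pyRange 0 (mc + 1) 1).map (fun cc => cov.getD ((k : Int), cc) "") := by
  simp [pvMatz, PySem.List.getElem_pyRange_one]

-- the single-position update: A's guarded in-place write matches B's dict insert
lemma set_step (cov : PySem.Dict (Int × Int) String) (mr mc rr cc : Int) (t : String)
    (hmr : 0 ≤ mr) (hmc : 0 ≤ mc) (hR : rr ≤ mr) (hC : cc ≤ mc) :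
    (if 0 ≤ rr ∧ rr < ((pvMatz cov mr mc).length : Int) ∧ 0 ≤ cc ∧
          cc < ((PySem.List.pyGetD (pvMatz cov mr mc) 0 []).length : Int) then
        PySem.List.pySetD (pvMatz cov mr mc) rr
          (PySem.List.pySetD (PySem.List.pyGetD (pvMatz cov mr mc) rr []) cc t)
      else pvMatz cov mr mc)
      = pvMatz (cov.insert (rr, cc) t) mr mc := by
  have hlen : (pvMatz cov mr mc).length = (mr + 1).toNat := matz_length cov mr mc
  have h0 : PySem.List.pyGetD (pvMatz cov mr mc) 0 [] = (pvMatz cov mr mc)[0]'(by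
      simp only [hlen]; omega) := by
    simpa using PySem.List.pyGetD_ofNat (xs := pvMatz cov mr mc) (n := 0) (d := []) (by simp only [hlen]; omega)
  have h0len : (PySem.List.pyGetD (pvMatz cov mr mc) 0 []).length = (mc + 1).toNat := by
    rw [h0, matz_getElem]
    simp [PySem.List.length_pyRange_one]
  by_cases hpos : 0 ≤ rr ∧ 0 ≤ cc
  · rw [if_pos (by refine ⟨hpos.1, ?_, hpos.2, ?_⟩ <;> · simp only [hlen, h0len]; omega)]
    have hrlt : rr.toNat < (pvMatz cov mr mc).length := by simp only [hlen]; omega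
    have hget : PySem.List.pyGetD (pvMatz cov mr mc) rr [] = (pvMatz cov mr mc)[rr.toNat] := by
      rw [PySem.List.pyGetD_of_nonneg _ _ hpos.1]
      exact List.getD_eq_getElem _ _ hrlt
    have hrr : ((rr.toNat : Int)) = rr := Int.toNat_of_nonneg hpos.1
    have hcc : ((cc.toNat : Int)) = cc := Int.toNat_of_nonneg hpos.2
    rw [PySem.List.pySetD_of_nonneg _ _ hpos.1, PySem.List.pySetD_of_nonneg _ _ hpos.2, hget]
    apply List.ext_getElem
    · simp [hlen, matz_length]
    · intro k hk1 hk2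
      have hklen : k < (mr + 1).toNat := by simpa [List.length_set, hlen] using hk1
      rw [List.getElem_set]
      by_cases hkr : rr.toNat = k
      · rw [if_pos hkr]
        subst hkr
        apply List.ext_getElem
        · simp [pvMatz, PySem.List.length_pyRange_one]
        · intro j hj1 hj2
          have hjlen : j < (mc + 1).toNat := by
            simpa [pvMatz, List.length_set, PySem.List.length_pyRange_one] using hj1
          rw [List.getElem_set]
          simp only [pvMatz, List.getElem_map, PySem.List.getElem_pyRange_one, PySem.Dict.getD_insert]
          by_cases hjc : cc.toNat = j
          · rw [if_pos hjc, if_pos (by subst hjc; simp [hrr, hcc])]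
          · rw [if_neg hjc, if_neg (by simp only [Prod.mk.injEq, zero_add, hrr, not_and]; intro _ h2; omega)]
      · rw [if_neg hkr]
        apply List.ext_getElem
        · simp [pvMatz, PySem.List.length_pyRange_one]
        · intro j hj1 hj2
          simp only [pvMatz, List.getElem_map, PySem.List.getElem_pyRange_one, PySem.Dict.getD_insert]
          rw [if_neg (by simp only [Prod.mk.injEq, zero_add, not_and]; intro h1 _; omega)]
  · rw [if_neg (by simp only [hlen, h0len, not_and, not_lt]; intro h1 h2 h3; omega)]
    unfold pvMatz
    apply List.map_congr_left
    intro i hi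
    apply List.map_congr_left
    intro j hj
    have hi' : 0 ≤ i := (PySem.List.mem_pyRange_one.mp hi).1
    have hj' : 0 ≤ j := (PySem.List.mem_pyRange_one.mp hj).1
    rw [PySem.Dict.getD_insert, if_neg (by simp only [Prod.mk.injEq, not_and]; intro h1 h2; omega)]

lemma cols_fold (cov : PySem.Dict (Int × Int) String) (mr mc r ci : Int) (t : String)
    (L : List Int) (hmr : 0 ≤ mr) (hmc : 0 ≤ mc) (hr : r ≤ mr) (hL : ∀ dc ∈ L, ci + dc ≤ mc) :
    L.foldl (fun grid dc =>
        if 0 ≤ r ∧ r < (grid.length : Int) ∧ 0 ≤ ci + dc ∧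
            ci + dc < ((PySem.List.pyGetD grid 0 []).length : Int) then
          PySem.List.pySetD grid r (PySem.List.pySetD (PySem.List.pyGetD grid r []) (ci + dc) t)
        else grid) (pvMatz cov mr mc)
      = pvMatz (L.foldl (fun cv dc => cv.insert (r, ci + dc) t) cov) mr mc := by
  induction L generalizing cov with
  | nil => rfl
  | cons dc L ih =>
      simp only [List.foldl_cons]
      rw [set_step cov mr mc r (ci + dc) t hmr hmc hr (hL dc List.mem_cons_self)]
      exact ih _ (fun x hx => hL x (List.mem_cons_of_mem _ hx))

lemma rows_fold (cov : PySem.Dict (Int × Int) String) (mr mc r ci cs : Int) (t : String)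
    (L : List Int) (hmr : 0 ≤ mr) (hmc : 0 ≤ mc) (hrL : ∀ dr ∈ L, r + dr ≤ mr)
    (hcs : ∀ dc ∈ PySem.List.pyRange 0 cs 1, ci + dc ≤ mc) :
    L.foldl (fun grid dr =>
        (PySem.List.pyRange 0 cs 1).foldl (fun grid dc =>
          if 0 ≤ r + dr ∧ r + dr < (grid.length : Int) ∧ 0 ≤ ci + dc ∧
              ci + dc < ((PySem.List.pyGetD grid 0 []).length : Int) then
            PySem.List.pySetD grid (r + dr)
              (PySem.List.pySetD (PySem.List.pyGetD grid (r + dr) []) (ci + dc) t)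
          else grid) grid) (pvMatz cov mr mc)
      = pvMatz (L.foldl (fun cv dr =>
          (PySem.List.pyRange 0 cs 1).foldl (fun cv dc => cv.insert (r + dr, ci + dc) t) cv) cov) mr mc := by
  induction L generalizing cov with
  | nil => rfl
  | cons dr L ih =>
      simp only [List.foldl_cons]
      rw [cols_fold cov mr mc (r + dr) ci t _ hmr hmc (hrL dr List.mem_cons_self) hcs]
      exact ih _ (fun x hx => hrL x (List.mem_cons_of_mem _ hx))

lemma cell_step (cov : PySem.Dict (Int × Int) String) (mr mc : Int) (c : List (String × String))
    (hmr : 0 ≤ mr) (hmc : 0 ≤ mc)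
    (hbr : pvCellInt c "row" 0 + pvCellInt c "rowSpan" 1 - 1 ≤ mr)
    (hbc : pvCellInt c "col" 0 + pvCellInt c "colSpan" 1 - 1 ≤ mc) :
    pvAStep (pvMatz cov mr mc) c = pvMatz (pvCovStep cov c) mr mc := by
  unfold pvAStep pvCovStep
  exact rows_fold cov mr mc _ _ _ _ _ hmr hmc
    (fun dr hdr => by
      have := PySem.List.mem_pyRange_one.mp hdr
      omega)
    (fun dc hdc => by
      have := PySem.List.mem_pyRange_one.mp hdc
      omega)

lemma cells_fold (L : List (List (String × String))) (cov : PySem.Dict (Int × Int) String)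
    (mr mc : Int) (hmr : 0 ≤ mr) (hmc : 0 ≤ mc)
    (hb : ∀ c ∈ L, pvCellInt c "row" 0 + pvCellInt c "rowSpan" 1 - 1 ≤ mr ∧
        pvCellInt c "col" 0 + pvCellInt c "colSpan" 1 - 1 ≤ mc) :
    L.foldl pvAStep (pvMatz cov mr mc) = pvMatz (L.foldl pvCovStep cov) mr mc := by
  induction L generalizing cov with
  | nil => rfl
  | cons c L ih =>
      simp only [List.foldl_cons]
      rw [cell_step cov mr mc c hmr hmc (hb c List.mem_cons_self).1 (hb c List.mem_cons_self).2]
      exact ih _ (fun x hx => hb x (List.mem_cons_of_mem _ hx))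

lemma matz_empty (mr mc : Int) :
    pvMatz PySem.Dict.empty mr mc
      = (PySem.List.pyRange 0 (mr + 1) 1).map (fun _ => (PySem.List.pyRange 0 (mc + 1) 1).map (fun _ => "")) := by
  simp [pvMatz, PySem.Dict.getD_empty]


-- ===== VERDICT (by name: the statement is the Claim_ definition above) =====
theorem cells_to_table_grid_spec : Claim_equal_cells_to_table_grid := by
  intro cells _ _
  unfold Spec_cells_to_table_grid
  rw [A_eq, B_eq]
  by_cases h : cells = []
  · simp [h]
  · rw [if_neg h, if_neg h, B_proj]
    have h0 := maxfold_le_init cells (0, 0)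
    have hmr : 0 ≤ (cells.foldl pvMaxStep (0, 0)).1 := h0.1
    have hmc : 0 ≤ (cells.foldl pvMaxStep (0, 0)).2 := h0.2
    rw [← matz_empty]
    exact cells_fold cells PySem.Dict.empty _ _ hmr hmc
      (fun c hc => maxfold_mem cells c hc (0, 0))
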